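-- pv_equiv track=rewrite | github.com/Jeudess/Trabalho_LIP | 2/questao3.py | impares_duplicados
-- ===== SOURCE A (Python) =====
-- def impares_duplicados(lista):
--     if not lista:
--         return []
--     head, *tail = lista
--     resultado_cauda = impares_duplicados(tail)
--     if head % 2 != 0 and head in tail and head not in resultado_cauda:
--         return [head] + resultado_cauda
--     return resultado_cauda
-- ===== SOURCE B (Python) =====
-- def impares_duplicados(lista):
--     remaining = {}
--     for x in lista:
--         remaining[x] = remaining.get(x, 0) + 1
--     resultado = []
--     for x in lista:
--         remaining[x] -= 1
--         if x % 2 != 0 and remaining[x] == 1: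
--             resultado.append(x)
--     return resultado
-- ===== Notes on version B (the rewrite author's own statement) =====
-- stated objective: faster
-- what changed: Replaces A's head/tail recursion with its three linear scans per element (head in tail, head in resultado_cauda) by two passes: a counting dict built once, then one loop that decrements the remaining count and emits x when x is odd and exactly one occurrence remains.
import Mathlib
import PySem

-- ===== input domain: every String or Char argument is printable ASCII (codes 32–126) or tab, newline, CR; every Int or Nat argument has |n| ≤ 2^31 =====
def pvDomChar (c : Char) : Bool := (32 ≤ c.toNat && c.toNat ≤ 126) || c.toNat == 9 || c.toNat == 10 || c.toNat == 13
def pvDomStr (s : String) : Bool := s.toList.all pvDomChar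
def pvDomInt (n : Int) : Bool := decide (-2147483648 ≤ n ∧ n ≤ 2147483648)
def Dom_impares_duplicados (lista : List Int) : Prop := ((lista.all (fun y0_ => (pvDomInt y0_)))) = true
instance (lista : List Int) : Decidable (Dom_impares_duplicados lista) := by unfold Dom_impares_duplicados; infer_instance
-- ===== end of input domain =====

-- B replaces A's quadratic head/tail recursion (with membership scans of the tail and of the
-- result) by two passes over the list: a counting dict built once, then a single emitting loop
-- that decrements the remaining count and outputs x when it is odd and exactly one occurrence
-- remains — same values, same order, fewer scans (objective: faster).

-- ===== PORT A =====
def impares_duplicados (lista : List Int) : List Int :=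
  match lista with
  | [] => []
  | head :: tail =>
    let resultado_cauda := impares_duplicados tail
    if PySem.Int.mod head 2 ≠ 0 ∧ head ∈ tail ∧ head ∉ resultado_cauda then
      head :: resultado_cauda
    else
      resultado_cauda

-- ===== PORT B =====
def impares_duplicados_alt (lista : List Int) : List Int :=
  let remaining : PySem.Dict Int Int :=
    lista.foldl (fun d x => d.insert x (d.getD x 0 + 1)) PySem.Dict.empty
  (lista.foldl
    (fun (st : PySem.Dict Int Int × List Int) x =>
      let d := st.1.insert x (st.1.getD x 0 - 1)
      if PySem.Int.mod x 2 ≠ 0 ∧ d.getD x 0 = 1 then (d, st.2 ++ [x]) else (d, st.2))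
    (remaining, [])).2

-- ===== PRECONDITION & SPEC =====
def Spec_impares_duplicados (lista : List Int) (out : List Int) : Prop := out = impares_duplicados_alt lista
instance (lista : List Int) (out : List Int) : Decidable (Spec_impares_duplicados lista out) := by unfold Spec_impares_duplicados; infer_instance

-- ===== CLAIM (what is proved, stated in full; the proofs are below) =====
def Claim_equal_impares_duplicados : Prop := ∀ (lista : List Int), Dom_impares_duplicados lista → Spec_impares_duplicados lista (impares_duplicados lista)

-- ===== LEMMAS AND PROOFS =====

-- common specification: emit x at the occurrence after which exactly one copy of x remains
def emitSpec : List Int → List Int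
  | [] => []
  | h :: t => if PySem.Int.mod h 2 ≠ 0 ∧ t.count h = 1 then h :: emitSpec t else emitSpec t

theorem impares_duplicados_cons (h : Int) (t : List Int) :
    impares_duplicados (h :: t) =
      if PySem.Int.mod h 2 ≠ 0 ∧ h ∈ t ∧ h ∉ impares_duplicados t then
        h :: impares_duplicados t
      else impares_duplicados t := rfl

theorem mem_impares_duplicados (x : Int) (l : List Int) :
    x ∈ impares_duplicados l ↔ PySem.Int.mod x 2 ≠ 0 ∧ 2 ≤ l.count x := by
  induction l with
  | nil =>
    constructor
    · intro hx; cases hx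
    · rintro ⟨-, h2⟩; simp at h2
  | cons h t ih =>
    rw [impares_duplicados_cons]
    by_cases hx : x = h
    · subst hx
      rw [List.count_cons_self]
      split_ifs with hc
      · rcases hc with ⟨hodd, hmem, -⟩
        have h1 : 0 < t.count x := List.count_pos_iff.mpr hmem
        exact ⟨fun _ => ⟨hodd, by omega⟩, fun _ => List.mem_cons_self⟩
      · rw [ih]
        constructor
        · rintro ⟨hodd, h2⟩; exact ⟨hodd, by omega⟩
        · rintro ⟨hodd, h2⟩
          refine ⟨hodd, ?_⟩
          by_cases hge : 2 ≤ t.count x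
          · exact hge
          · have hmem : x ∈ t := List.count_pos_iff.mp (by omega)
            have hnin : x ∉ impares_duplicados t := fun hin => hge (ih.mp hin).2
            exact absurd ⟨hodd, hmem, hnin⟩ hc
    · have hcnt : (h :: t).count x = t.count x :=
        List.count_cons_of_ne (fun he => hx he.symm)
      rw [hcnt]
      split_ifs with hc
      · rw [List.mem_cons, ih]
        constructor
        · rintro (rfl | hin)
          · exact absurd rfl hx
          · exact hin
        · exact Or.inr
      · exact ih

theorem impares_duplicados_eq_emitSpec (l : List Int) :
    impares_duplicados l = emitSpec l := by
  induction l with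
  | nil => rfl
  | cons h t ih =>
    rw [impares_duplicados_cons]
    show _ = if PySem.Int.mod h 2 ≠ 0 ∧ t.count h = 1 then h :: emitSpec t else emitSpec t
    by_cases hodd : PySem.Int.mod h 2 ≠ 0
    · by_cases hcnt : t.count h = 1
      · have hmem : h ∈ t := List.count_pos_iff.mp (by omega)
        have hnot : h ∉ impares_duplicados t := by
          rw [mem_impares_duplicados]; rintro ⟨-, h2⟩; omega
        rw [if_pos ⟨hodd, hmem, hnot⟩, if_pos ⟨hodd, hcnt⟩, ih]
      · have hnc : ¬(PySem.Int.mod h 2 ≠ 0 ∧ h ∈ t ∧ h ∉ impares_duplicados t) := by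
          rintro ⟨-, hmem, hnot⟩
          have h1 : 0 < t.count h := List.count_pos_iff.mpr hmem
          have h2 : ¬ 2 ≤ t.count h := fun h2 =>
            hnot ((mem_impares_duplicados h t).mpr ⟨hodd, h2⟩)
          omega
        rw [if_neg hnc, if_neg (fun hc => hcnt hc.2), ih]
    · rw [if_neg (fun hc => hodd hc.1), if_neg (fun hc => hodd hc.1), ih]

theorem alt_loop_eq_emitSpec (s : List Int) (d : PySem.Dict Int Int) (acc : List Int)
    (hd : ∀ x : Int, d.getD x 0 = (s.count x : Int)) :
    (s.foldl
      (fun (st : PySem.Dict Int Int × List Int) x =>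
        let d := st.1.insert x (st.1.getD x 0 - 1)
        if PySem.Int.mod x 2 ≠ 0 ∧ d.getD x 0 = 1 then (d, st.2 ++ [x]) else (d, st.2))
      (d, acc)).2 = acc ++ emitSpec s := by
  induction s generalizing d acc with
  | nil => simp [emitSpec]
  | cons h t ih =>
    simp only [List.foldl_cons, emitSpec]
    have hself : (d.insert h (d.getD h 0 - 1)).getD h 0 = (t.count h : Int) := by
      rw [PySem.Dict.getD_insert_self, hd h, List.count_cons_self]
      push_cast; ring
    have hd' : ∀ x : Int, (d.insert h (d.getD h 0 - 1)).getD x 0 = (t.count x : Int) := by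
      intro x
      by_cases hx : x = h
      · subst hx; exact hself
      · rw [PySem.Dict.getD_insert_of_ne _ _ _ hx, hd x,
          List.count_cons_of_ne (fun he => hx he.symm)]
    have hcond : ((d.insert h (d.getD h 0 - 1)).getD h 0 = 1) ↔ (t.count h = 1) := by
      rw [hself]; exact_mod_cast Iff.rfl
    by_cases hc : PySem.Int.mod h 2 ≠ 0 ∧ t.count h = 1
    · rw [if_pos ⟨hc.1, hcond.mpr hc.2⟩, if_pos hc, ih _ _ hd']
      simp
    · rw [if_neg (fun hp => hc ⟨hp.1, hcond.mp hp.2⟩), if_neg hc, ih _ _ hd']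

-- ===== VERDICT (by name: the statement is the Claim_ definition above) =====
theorem impares_duplicados_spec : Claim_equal_impares_duplicados := by
  intro lista _
  unfold Spec_impares_duplicados impares_duplicados_alt
  rw [impares_duplicados_eq_emitSpec]
  rw [alt_loop_eq_emitSpec lista _ []
    (fun x => by rw [PySem.Dict.getD_foldl_insert_add_one, PySem.Dict.getD_empty]; ring)]
  rfl
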